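-- pv_equiv track=rewrite | github.com/drdubel/cwiczenia | oij/python/drugietapzad2.py | plu
-- ===== SOURCE A (Python) =====
-- def plu(n, ciag_n):
--     pkt_wiez = []
--     ind = 0
--     odw_ind = len(ciag_n) - 1
--     for wys in ciag_n:
--         pkt_wiez.append(wys - ind + wys - odw_ind)
--         ind += 1
--         odw_ind -= 1
--     srdk_krzyza = pkt_wiez.index(max(pkt_wiez))
--     wys_krzyza = ciag_n[srdk_krzyza]
--     wys_prop = 1
--     i = 0
--     while i <= wys_krzyza >= wys_prop:
--         for j in range(1, i + 1):
--             if (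
--                 wys_prop - (wys_prop - 1) // 2 > ciag_n[srdk_krzyza + j]
--                 and wys_prop - (wys_prop - 1) // 2 > ciag_n[srdk_krzyza - j]
--             ):
--                 return (wys_prop - 1) // 2
--         if wys_krzyza >= wys_prop + 2:
--             wys_prop += 2
--             i += 1
--         else:
--             return (wys_prop - 1) // 2
-- ===== SOURCE B (Python) =====
-- def plu(n, ciag_n):
--     # One pass: the cross centre is the first maximum (A's pkt_wiez is an
--     # affine shift of ciag_n); the answer is the smallest k that is either
--     # the height cap k0=(wys-1)//2 or max(j, max of the two neighbours at
--     # distance j) for some j, computed as a running minimum.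
--     wys = max(ciag_n)
--     s = ciag_n.index(wys)
--     L = len(ciag_n)
--     k0 = (wys - 1) // 2
--     ans = k0
--     for j in range(1, min(k0, L - s - 1) + 1):
--         c = ciag_n[s + j] if ciag_n[s + j] >= ciag_n[s - j] else ciag_n[s - j]
--         cand = j if j >= c else c
--         if cand < ans:
--             ans = cand
--     return ans
-- ===== Notes on version B (the rewrite author's own statement) =====
-- stated objective: faster
-- what changed: A finds the centre via an auxiliary pkt_wiez list and then grows the proposed arm length by trial, rescanning all distances 1..i for every candidate height (quadratic in the answer); B locates the first maximum directly and computes the answer in one running-minimum pass over the distances j, using that the result is min(k0, min_j max(j, higher neighbour at distance j)).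
-- outside the precondition, e.g. on plu(1, [0]): A returns None, B returns -1
import Mathlib
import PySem

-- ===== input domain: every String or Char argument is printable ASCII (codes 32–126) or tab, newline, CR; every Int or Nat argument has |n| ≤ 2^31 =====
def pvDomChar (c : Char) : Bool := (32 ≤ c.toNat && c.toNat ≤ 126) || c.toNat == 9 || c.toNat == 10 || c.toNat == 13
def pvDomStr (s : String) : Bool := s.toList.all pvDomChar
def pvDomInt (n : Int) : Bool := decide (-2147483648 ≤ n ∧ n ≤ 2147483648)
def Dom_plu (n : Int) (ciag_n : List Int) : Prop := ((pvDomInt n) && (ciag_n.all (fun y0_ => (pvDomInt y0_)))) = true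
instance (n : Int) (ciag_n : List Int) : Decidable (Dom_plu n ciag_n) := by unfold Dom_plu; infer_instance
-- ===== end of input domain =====

-- B replaces A's trial loop over growing arm lengths (quadratic in the answer) by a single
-- running-minimum pass over the distances j, using that the answer is min(k0, min_j max(j, nbr j)).

-- ===== PORT A =====
-- the pkt_wiez-building for loop (state: ind, odw_ind)
def pluPkt : List Int → Int → Int → List Int
  | [], _, _ => []
  | w :: t, ind, odw => (w - ind + (w - odw)) :: pluPkt t (ind + 1) (odw - 1)

-- 'for j in range(1, i + 1)': some r = an inner return, none = loop fell through.
-- pyGet?.getD 0 : where Python would raise IndexError (excluded by Pre_plu) the port reads 0.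
def pluInner (a : List Int) (s wysProp i j : Int) : Option Int :=
  if _h : j ≤ i then
    if wysProp - PySem.Int.floordiv (wysProp - 1) 2 > (PySem.List.pyGet? a (s + j)).getD 0
        ∧ wysProp - PySem.Int.floordiv (wysProp - 1) 2 > (PySem.List.pyGet? a (s - j)).getD 0 then
      some (PySem.Int.floordiv (wysProp - 1) 2)
    else
      pluInner a s wysProp i (j + 1)
  else none
termination_by (i + 1 - j).toNat
decreasing_by omega

-- the while loop; falling out of the loop is Python's implicit 'return None' (excluded by Pre_plu): 0
def pluLoop (a : List Int) (wys s wysProp i : Int) : Int :=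
  if _h : i ≤ wys ∧ wysProp ≤ wys then
    match pluInner a s wysProp i 1 with
    | some r => r
    | none =>
      if _h2 : wys ≥ wysProp + 2 then
        pluLoop a wys s (wysProp + 2) (i + 1)
      else
        PySem.Int.floordiv (wysProp - 1) 2
  else 0
termination_by (wys - wysProp).toNat
decreasing_by omega

def plu (n : Int) (ciag_n : List Int) : Int :=
  let pkt := pluPkt ciag_n 0 ((ciag_n.length : Int) - 1)
  match PySem.List.max? pkt (fun y => y) with
  | none => 0  -- max([]) raises ValueError (excluded by Pre_plu)
  | some mx =>
    let srdk : Int := ((PySem.List.index? pkt mx).getD 0 : Nat)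
    let wys := (PySem.List.pyGet? ciag_n srdk).getD 0
    pluLoop ciag_n wys srdk 1 0

-- ===== PORT B =====
-- running minimum over j = 1 .. jmax of max(j, neighbour max at distance j)
def pluScan (a : List Int) (s jmax ans j : Int) : Int :=
  if _h : j ≤ jmax then
    let x := (PySem.List.pyGet? a (s + j)).getD 0
    let y := (PySem.List.pyGet? a (s - j)).getD 0
    let c := if x ≥ y then x else y
    let cand := if j ≥ c then j else c
    pluScan a s jmax (if cand < ans then cand else ans) (j + 1)
  else ans
termination_by (jmax + 1 - j).toNat
decreasing_by omega

def plu_alt (n : Int) (ciag_n : List Int) : Int :=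
  match PySem.List.max? ciag_n (fun y => y) with
  | none => 0
  | some wys =>
    let s : Int := ((PySem.List.index? ciag_n wys).getD 0 : Nat)
    let L : Int := ciag_n.length
    let k0 := PySem.Int.floordiv (wys - 1) 2
    pluScan ciag_n s (min k0 (L - s - 1)) k0 1

-- ===== PRECONDITION & SPEC =====
-- Pre_plu holds exactly where the Python A returns an int: the list is nonempty with max ≥ 1
-- (otherwise max raises / A falls through returning None), and the scan returns before its first
-- out-of-range read at distance L - s (either the height cap k0 keeps it inside, or some in-range
-- distance j already has both neighbours ≤ L - s).
def Pre_plu (n : Int) (ciag_n : List Int) : Prop :=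
  ciag_n ≠ [] ∧
  1 ≤ (PySem.List.max? ciag_n (fun y => y)).getD 0 ∧
  (PySem.Int.floordiv ((PySem.List.max? ciag_n (fun y => y)).getD 0 - 1) 2
      ≤ (ciag_n.length : Int) - (((PySem.List.index? ciag_n ((PySem.List.max? ciag_n (fun y => y)).getD 0)).getD 0 : Nat) : Int) - 1 ∨
    ∃ j ∈ PySem.List.pyRange 1
        ((ciag_n.length : Int) - (((PySem.List.index? ciag_n ((PySem.List.max? ciag_n (fun y => y)).getD 0)).getD 0 : Nat) : Int)) 1,
      max ((PySem.List.pyGet? ciag_n ((((PySem.List.index? ciag_n ((PySem.List.max? ciag_n (fun y => y)).getD 0)).getD 0 : Nat) : Int) + j)).getD 0)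
          ((PySem.List.pyGet? ciag_n ((((PySem.List.index? ciag_n ((PySem.List.max? ciag_n (fun y => y)).getD 0)).getD 0 : Nat) : Int) - j)).getD 0)
        ≤ (ciag_n.length : Int) - (((PySem.List.index? ciag_n ((PySem.List.max? ciag_n (fun y => y)).getD 0)).getD 0 : Nat) : Int))
instance (n : Int) (ciag_n : List Int) : Decidable (Pre_plu n ciag_n) := by unfold Pre_plu; infer_instance

def pvWitness_plu : Int × List Int := (3, [0, 2, 0])

def Spec_plu (n : Int) (ciag_n : List Int) (out : Int) : Prop := out = plu_alt n ciag_n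
instance (n : Int) (ciag_n : List Int) (out : Int) : Decidable (Spec_plu n ciag_n out) := by unfold Spec_plu; infer_instance

-- ===== CLAIM (what is proved, stated in full; the proofs are below) =====
def Claim_equal_plu : Prop := ∀ (n : Int) (ciag_n : List Int), Dom_plu n ciag_n → Pre_plu n ciag_n → Spec_plu n ciag_n (plu n ciag_n)

-- ===== LEMMAS AND PROOFS =====

-- the neighbour maximum at distance j from the centre s, and the arm candidate at distance j
def pluNbr (a : List Int) (s j : Int) : Int :=
  max ((PySem.List.pyGet? a (s + j)).getD 0) ((PySem.List.pyGet? a (s - j)).getD 0)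
def pluF (a : List Int) (s j : Int) : Int := max j (pluNbr a s j)

theorem pluPkt_eq_map (a : List Int) (ind odw : Int) :
    pluPkt a ind odw = a.map (fun x => 2 * x - (ind + odw)) := by
  induction a generalizing ind odw with
  | nil => rfl
  | cons w t ih =>
    simp only [pluPkt, List.map]
    refine congrArg₂ (· :: ·) (by ring) ?_
    rw [ih, show ind + 1 + (odw - 1) = ind + odw by ring]

theorem pluScan_step (a : List Int) (s jmax ans j : Int) (h : j ≤ jmax) :
    pluScan a s jmax ans j = pluScan a s jmax (min ans (pluF a s j)) (j + 1) := by
  rw [pluScan, dif_pos h]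
  show pluScan _ _ _ _ _ = _
  congr 1
  simp only [pluF, pluNbr]
  split_ifs <;> omega

theorem pluScan_stop (a : List Int) (s jmax ans j : Int) (h : jmax < j) :
    pluScan a s jmax ans j = ans := by
  rw [pluScan, dif_neg (by omega)]

theorem pluScan_le_ans (a : List Int) (s jmax ans j : Int) :
    pluScan a s jmax ans j ≤ ans := by
  by_cases h : j ≤ jmax
  · rw [pluScan_step a s jmax ans j h]
    exact le_trans (pluScan_le_ans a s jmax (min ans (pluF a s j)) (j + 1)) (min_le_left _ _)
  · rw [pluScan_stop a s jmax ans j (by omega)]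
termination_by (jmax + 1 - j).toNat
decreasing_by omega

theorem pluScan_le_f (a : List Int) (s jmax ans j : Int) :
    ∀ j', j ≤ j' → j' ≤ jmax → pluScan a s jmax ans j ≤ pluF a s j' := by
  intro j' h1 h2
  by_cases h : j = j'
  · subst h
    rw [pluScan_step a s jmax ans j h2]
    exact le_trans (pluScan_le_ans a s jmax _ (j + 1)) (min_le_right _ _)
  · rw [pluScan_step a s jmax ans j (by omega)]
    exact pluScan_le_f a s jmax (min ans (pluF a s j)) (j + 1) j' (by omega) h2
termination_by (jmax + 1 - j).toNat
decreasing_by omega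

theorem pluScan_attained (a : List Int) (s jmax ans j : Int) :
    pluScan a s jmax ans j = ans ∨
      ∃ j', j ≤ j' ∧ j' ≤ jmax ∧ pluScan a s jmax ans j = pluF a s j' := by
  by_cases h : j ≤ jmax
  · rw [pluScan_step a s jmax ans j h]
    rcases pluScan_attained a s jmax (min ans (pluF a s j)) (j + 1) with h1 | ⟨j', hj1, hj2, hj3⟩
    · rcases le_total ans (pluF a s j) with hc | hc
      · left; rw [h1]; omega
      · right; exact ⟨j, le_refl j, h, by rw [h1]; omega⟩
    · right; exact ⟨j', by omega, hj2, hj3⟩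
  · left; exact pluScan_stop a s jmax ans j (by omega)
termination_by (jmax + 1 - j).toNat
decreasing_by omega

theorem pluScan_seed_le (a : List Int) (s jmax ans j : Int)
    (h : ∀ j', j ≤ j' → j' ≤ jmax → ans ≤ pluF a s j') :
    pluScan a s jmax ans j = ans := by
  by_cases hc : j ≤ jmax
  · rw [pluScan_step a s jmax ans j hc]
    have hm : min ans (pluF a s j) = ans := by have := h j le_rfl hc; omega
    rw [hm]
    exact pluScan_seed_le a s jmax ans (j + 1) (fun j' h1 h2 => h j' (by omega) h2)
  · exact pluScan_stop a s jmax ans j (by omega)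
termination_by (jmax + 1 - j).toNat
decreasing_by omega

theorem pluScan_split (a : List Int) (s hi mid ans j : Int) (h1 : j ≤ mid + 1) (h2 : mid ≤ hi) :
    pluScan a s hi ans j = pluScan a s hi (pluScan a s mid ans j) (mid + 1) := by
  by_cases hc : j ≤ mid
  · rw [pluScan_step a s hi ans j (by omega), pluScan_step a s mid ans j hc]
    exact pluScan_split a s hi mid (min ans (pluF a s j)) (j + 1) (by omega) h2
  · have hj : j = mid + 1 := by omega
    subst hj
    rw [pluScan_stop a s mid ans (mid + 1) (by omega)]
termination_by (mid + 1 - j).toNat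
decreasing_by omega

theorem plu_floordiv_two (i : Int) : PySem.Int.floordiv (2 * i + 1 - 1) 2 = i := by
  have h1 := PySem.Int.floordiv_mul_add_mod (2 * i + 1 - 1) 2
  have h2 := PySem.Int.mod_nonneg (2 * i + 1 - 1) (show (0:Int) < 2 by omega)
  have h3 := PySem.Int.mod_lt (2 * i + 1 - 1) (show (0:Int) < 2 by omega)
  omega

theorem pluInner_eq (a : List Int) (s i : Int) :
    ∀ j, pluInner a s (2 * i + 1) i j =
      if ∃ j' ∈ Finset.Icc j i, pluNbr a s j' ≤ i then some i else none := by
  intro j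
  by_cases h : j ≤ i
  · rw [pluInner, dif_pos h, plu_floordiv_two i]
    by_cases hc : pluNbr a s j ≤ i
    · have hxy : (2 * i + 1 - i > (PySem.List.pyGet? a (s + j)).getD 0
          ∧ 2 * i + 1 - i > (PySem.List.pyGet? a (s - j)).getD 0) := by
        simp only [pluNbr, max_le_iff] at hc; omega
      rw [if_pos hxy, if_pos ⟨j, Finset.mem_Icc.mpr ⟨le_rfl, h⟩, hc⟩]
    · have hxy : ¬ (2 * i + 1 - i > (PySem.List.pyGet? a (s + j)).getD 0
          ∧ 2 * i + 1 - i > (PySem.List.pyGet? a (s - j)).getD 0) := by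
        simp only [pluNbr, max_le_iff] at hc; omega
      rw [if_neg hxy, pluInner_eq a s i (j + 1)]
      have hiff : (∃ j' ∈ Finset.Icc (j + 1) i, pluNbr a s j' ≤ i)
          ↔ (∃ j' ∈ Finset.Icc j i, pluNbr a s j' ≤ i) := by
        constructor
        · rintro ⟨j', hm, hnb⟩
          rw [Finset.mem_Icc] at hm
          exact ⟨j', Finset.mem_Icc.mpr ⟨by omega, hm.2⟩, hnb⟩
        · rintro ⟨j', hm, hnb⟩
          rw [Finset.mem_Icc] at hm
          rcases eq_or_ne j' j with he | he
          · exact absurd (he ▸ hnb) hc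
          · exact ⟨j', Finset.mem_Icc.mpr ⟨by omega, hm.2⟩, hnb⟩
      rw [if_congr hiff rfl rfl]
  · rw [pluInner, dif_neg h, if_neg]
    rintro ⟨j', hm, _⟩
    rw [Finset.mem_Icc] at hm
    omega
termination_by j => (i + 1 - j).toNat
decreasing_by omega

theorem pluLoop_aux (a : List Int) (wys s : Int) (h1 : 1 ≤ wys) :
    ∀ i, 0 ≤ i → i ≤ pluScan a s (PySem.Int.floordiv (wys - 1) 2) (PySem.Int.floordiv (wys - 1) 2) 1 →
      pluLoop a wys s (2 * i + 1) i
        = pluScan a s (PySem.Int.floordiv (wys - 1) 2) (PySem.Int.floordiv (wys - 1) 2) 1 := by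
  intro i hi0 hir
  have hb1 := PySem.Int.floordiv_mul_add_mod (wys - 1) 2
  have hb2 := PySem.Int.mod_nonneg (wys - 1) (show (0:Int) < 2 by omega)
  have hb3 := PySem.Int.mod_lt (wys - 1) (show (0:Int) < 2 by omega)
  set k0 := PySem.Int.floordiv (wys - 1) 2 with hk0
  have hrk : pluScan a s k0 k0 1 ≤ k0 := pluScan_le_ans a s k0 k0 1
  rw [pluLoop, dif_pos (by constructor <;> omega), pluInner_eq a s i 1]
  by_cases hex : ∃ j' ∈ Finset.Icc (1 : Int) i, pluNbr a s j' ≤ i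
  · rw [if_pos hex]
    obtain ⟨j', hm, hnb⟩ := hex
    rw [Finset.mem_Icc] at hm
    have h5 : pluScan a s k0 k0 1 ≤ pluF a s j' := pluScan_le_f a s k0 k0 1 j' hm.1 (by omega)
    have h6 : pluF a s j' ≤ i := max_le hm.2 hnb
    show i = pluScan a s k0 k0 1
    omega
  · rw [if_neg hex]
    by_cases h2 : wys ≥ 2 * i + 1 + 2
    · rw [dif_pos h2]
      have hi1 : i + 1 ≤ pluScan a s k0 k0 1 := by
        rcases pluScan_attained a s k0 k0 1 with hA | ⟨j', hj1, hj2, hj3⟩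
        · omega
        · by_contra hcon
          have hfj : pluF a s j' ≤ i := by omega
          have : pluNbr a s j' ≤ i := le_trans (le_max_right _ _) hfj
          have : j' ≤ i := le_trans (le_max_left j' (pluNbr a s j')) hfj
          exact hex ⟨j', Finset.mem_Icc.mpr ⟨hj1, this⟩, by assumption⟩
      rw [show 2 * i + 1 + 2 = 2 * (i + 1) + 1 by ring]
      exact pluLoop_aux a wys s h1 (i + 1) (by omega) hi1
    · rw [dif_neg h2, plu_floordiv_two i]
      show i = pluScan a s k0 k0 1
      omega
termination_by i => (PySem.Int.floordiv (wys - 1) 2 + 1 - i).toNat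
decreasing_by omega

theorem pluScan_nonneg_start (a : List Int) (s k0 : Int) (hk : 0 ≤ k0) :
    0 ≤ pluScan a s k0 k0 1 := by
  rcases pluScan_attained a s k0 k0 1 with hA | ⟨j', hj1, _, hj3⟩
  · omega
  · have := le_max_left j' (pluNbr a s j')
    rw [hj3]; simp only [pluF]; omega

theorem pluLoop_eq_scan (a : List Int) (wys s : Int) (h1 : 1 ≤ wys) :
    pluLoop a wys s 1 0 = pluScan a s (PySem.Int.floordiv (wys - 1) 2)
      (PySem.Int.floordiv (wys - 1) 2) 1 := by
  have hb1 := PySem.Int.floordiv_mul_add_mod (wys - 1) 2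
  have hb2 := PySem.Int.mod_nonneg (wys - 1) (show (0:Int) < 2 by omega)
  have hb3 := PySem.Int.mod_lt (wys - 1) (show (0:Int) < 2 by omega)
  have h0 : (1 : Int) = 2 * 0 + 1 := by ring
  rw [h0]
  exact pluLoop_aux a wys s h1 0 le_rfl
    (pluScan_nonneg_start a s (PySem.Int.floordiv (wys - 1) 2) (by omega))

theorem plu_foldl_max_map (c : Int) :
    ∀ (t : List Int) (x : Int),
      (t.map (fun v => 2 * v - c)).foldl max (2 * x - c) = 2 * t.foldl max x - c := by
  intro t
  induction t with
  | nil => intro x; rfl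
  | cons y t ih =>
    intro x
    simp only [List.map, List.foldl]
    rw [show max (2 * x - c) (2 * y - c) = 2 * max x y - c by
      rcases le_total x y with h | h
      · rw [max_eq_right h, max_eq_right (by omega)]
      · rw [max_eq_left h, max_eq_left (by omega)]]
    exact ih (max x y)

theorem plu_max?_map_affine (c : Int) (a : List Int) :
    PySem.List.max? (a.map (fun x => 2 * x - c)) (fun y => y)
      = (PySem.List.max? a (fun y => y)).map (fun x => 2 * x - c) := by
  cases a with
  | nil => rfl
  | cons w t =>
    rw [List.map, PySem.List.max?_id_cons, PySem.List.max?_id_cons, Option.map_some,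
      plu_foldl_max_map c t w]

theorem plu_index?_map_affine (c : Int) :
    ∀ (a : List Int) (v : Int),
      PySem.List.index? (a.map (fun x => 2 * x - c)) (2 * v - c) = PySem.List.index? a v := by
  intro a
  induction a with
  | nil => intro v; rfl
  | cons w t ih =>
    intro v
    rcases eq_or_ne w v with h | h
    · subst h
      rw [List.map, PySem.List.index?_cons_self, PySem.List.index?_cons_self]
    · rw [List.map, PySem.List.index?_cons_of_ne _ (by omega : (2 * w - c : Int) ≠ 2 * v - c),
        PySem.List.index?_cons_of_ne _ h, ih]

-- ===== VERDICT (by name: the statement is the Claim_ definition above) =====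
theorem plu_spec : Claim_equal_plu := by
  intro n a _hdom hpre
  obtain ⟨hne, hmax1, hcase⟩ := hpre
  show plu n a = plu_alt n a
  -- name the max and its first index
  rcases hmx : PySem.List.max? a (fun y => y) with _ | wys
  · exact absurd ((PySem.List.max?_eq_none_iff a _).mp hmx) hne
  have hmem : wys ∈ a := PySem.List.max?_mem hmx
  rcases hidx : PySem.List.index? a wys with _ | s0
  · exact absurd ((PySem.List.index?_eq_none_iff a wys).mp hidx) (by simpa using hmem)
  obtain ⟨hk, hget, _⟩ := PySem.List.getElem_of_index?_eq_some hidx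
  rw [hmx] at hmax1 hcase
  simp only [Option.getD_some] at hmax1 hcase
  rw [hidx] at hcase
  simp only [Option.getD_some] at hcase
  -- evaluate port A's preprocessing
  have hL : pluPkt a 0 ((a.length : Int) - 1) = a.map (fun x => 2 * x - ((a.length : Int) - 1)) := by
    rw [pluPkt_eq_map, zero_add]
  have hwysread : (PySem.List.pyGet? a ((s0 : Nat) : Int)).getD 0 = wys := by
    rw [PySem.List.pyGet?_natCast, List.getElem?_eq_getElem hk, hget, Option.getD_some]
  simp only [plu, plu_alt, hL, plu_max?_map_affine, plu_index?_map_affine, hmx, hidx,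
    Option.map_some, Option.getD_some, hwysread]
  rw [pluLoop_eq_scan a wys (s0 : Int) hmax1]
  -- the two scans agree on the Pre_plu inputs
  set L : Int := (a.length : Int) with hLdef
  set k0 := PySem.Int.floordiv (wys - 1) 2 with hk0
  by_cases hkle : k0 ≤ L - (s0 : Int) - 1
  · rw [min_eq_left hkle]
  · rcases hcase with h | ⟨j0, hj0m, hj0⟩
    · omega
    · rw [PySem.List.mem_pyRange_one] at hj0m
      rw [min_eq_right (by omega)]
      rw [pluScan_split a (s0 : Int) k0 (L - (s0 : Int) - 1) k0 1 (by omega) (by omega)]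
      apply pluScan_seed_le
      intro j' hge _hle
      have h5 : pluScan a (s0 : Int) (L - (s0 : Int) - 1) k0 1 ≤ pluF a (s0 : Int) j0 :=
        pluScan_le_f a (s0 : Int) (L - (s0 : Int) - 1) k0 1 j0 hj0m.1 (by omega)
      have h6 : pluF a (s0 : Int) j0 ≤ L - (s0 : Int) := max_le (by omega) hj0
      have h7 : j' ≤ pluF a (s0 : Int) j' := le_max_left _ _
      omega
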